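-- pv_equiv track=rewrite | github.com/Dhruv-Panwala/Health-Workers-Assistant-Project | pocketflow-text2sql/nodes.py | _connect_selected_tables
-- ===== SOURCE A (Python) =====
-- def _connect_selected_tables(selected_tables, relationship_graph):
--     selected_table_set = set(selected_tables)
--
--     for start_index, start_table in enumerate(selected_tables):
--         for end_table in selected_tables[start_index + 1:]:
--             queue = [(start_table, [start_table])]
--             visited = {start_table}
--
--             while queue:
--                 current_table, path = queue.pop(0)
--                 if current_table == end_table:
--                     selected_table_set.update(path)
--                     break
--
--                 for neighbor in relationship_graph.get(current_table, set()):
--                     if neighbor in visited: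
--                         continue
--                     visited.add(neighbor)
--                     queue.append((neighbor, path + [neighbor]))
--
--     return selected_table_set
-- ===== SOURCE B (Python) =====
-- def _connect_selected_tables(selected_tables, relationship_graph):
--     result = set(selected_tables)
--     for i, start in enumerate(selected_tables):
--         targets = selected_tables[i + 1:]
--         if not targets:
--             continue
--         # One BFS from `start` builds a shortest-path tree as parent pointers
--         # (recorded when a node is dequeued; an index cursor avoids list.pop(0)).
--         parent = {}
--         visited = {start}
--         queue = [(start, None)]
--         qi = 0
--         while qi < len(queue):
--             node, par = queue[qi]
--             qi += 1
--             parent[node] = par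
--             for neighbor in relationship_graph.get(node, ()):
--                 if neighbor not in visited:
--                     visited.add(neighbor)
--                     queue.append((neighbor, node))
--         # Answer every later end table by walking parent pointers back to `start`.
--         for end in targets:
--             if end in parent:
--                 chain = []
--                 node = end
--                 while node is not None:
--                     chain.append(node)
--                     node = parent[node]
--                 result.update(reversed(chain))
--     return result
-- ===== Notes on version B (the rewrite author's own statement) =====
-- stated objective: faster
-- what changed: Instead of one path-carrying BFS per ordered pair of selected tables, B runs a single BFS per start table that builds a parent-pointer shortest-path tree (index cursor instead of O(n) list.pop(0), no path copying per enqueue), then answers each later end table by walking parent pointers back to the start.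
import Mathlib
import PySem

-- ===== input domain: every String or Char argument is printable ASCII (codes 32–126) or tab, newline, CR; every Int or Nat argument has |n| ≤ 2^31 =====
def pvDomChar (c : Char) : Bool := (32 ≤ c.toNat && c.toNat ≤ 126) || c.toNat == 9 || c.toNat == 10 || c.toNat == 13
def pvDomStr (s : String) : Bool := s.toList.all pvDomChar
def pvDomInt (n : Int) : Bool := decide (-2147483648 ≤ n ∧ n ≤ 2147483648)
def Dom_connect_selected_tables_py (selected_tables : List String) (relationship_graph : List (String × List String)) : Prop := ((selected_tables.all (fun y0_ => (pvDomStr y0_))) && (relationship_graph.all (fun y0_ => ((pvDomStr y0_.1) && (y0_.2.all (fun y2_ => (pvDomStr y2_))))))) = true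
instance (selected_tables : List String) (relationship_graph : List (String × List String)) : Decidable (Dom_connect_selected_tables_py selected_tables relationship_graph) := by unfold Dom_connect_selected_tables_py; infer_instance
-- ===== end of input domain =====

-- ===== PORT A =====
-- B replaces A's per-pair path-carrying BFS by ONE parent-pointer BFS per start table (objective: faster).
-- shared helper of both Pythons: `relationship_graph.get(x, <empty>)` — first-match assoc lookup
def pvAdj (relationship_graph : List (String × List String)) (x : String) : List String :=
  match relationship_graph.find? (fun p => p.1 == x) with
  | some p => p.2
  | none => []

-- fuel: each while-loop iteration pops a node that was enqueued exactly once (visited is marked at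
-- enqueue time), so iterations ≤ 1 + total length of all adjacency lists; this fuel never runs out
def pvFuel (relationship_graph : List (String × List String)) : Nat :=
  2 + (relationship_graph.map (fun p => p.2.length)).sum

-- A's inner `for neighbor in …` loop body: enqueue (neighbor, path + [neighbor]) if unvisited
def pvEnq (path : List String) (st : PySem.Set String × List (String × List String))
    (nb : String) : PySem.Set String × List (String × List String) :=
  if PySem.Set.contains st.1 nb then st
  else (PySem.Set.add st.1 nb, st.2 ++ [(nb, path ++ [nb])])

-- A's inner `while queue:` loop — queue of (table, path), returns the path when end_table is popped
def aSearch (relationship_graph : List (String × List String)) (end_table : String) :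
    Nat → List (String × List String) → PySem.Set String → Option (List String)
  | 0, _, _ => none
  | _ + 1, [], _ => none
  | fuel + 1, (current, path) :: rest, visited =>
    if current == end_table then some path
    else
      let st := (pvAdj relationship_graph current).foldl (pvEnq path) (visited, rest)
      aSearch relationship_graph end_table fuel st.2 st.1

def connect_selected_tables_py (selected_tables : List String) (relationship_graph : List (String × List String)) : List String :=
  (PySem.List.enumerate selected_tables).foldl
    (fun s p =>
      (selected_tables.drop (p.1.toNat + 1)).foldl
        (fun s end_table =>
          match aSearch relationship_graph end_table (pvFuel relationship_graph)
              [(p.2, [p.2])] (PySem.Set.ofList [p.2]) with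
          | some path => PySem.Set.update s path
          | none => s) s)
    (PySem.Set.ofList selected_tables)

-- ===== PORT B =====
-- B's inner `for neighbor in …` loop body: enqueue (neighbor, node) — the node it was reached from
def bEnq (node : String) (st : PySem.Set String × List (String × Option String))
    (nb : String) : PySem.Set String × List (String × Option String) :=
  if PySem.Set.contains st.1 nb then st
  else (PySem.Set.add st.1 nb, st.2 ++ [(nb, some node)])

-- B's `while qi < len(queue):` loop — records `parent[node] = par` when (node, par) is dequeued
def bStep (relationship_graph : List (String × List String)) :
    Nat → List (String × Option String) → Nat → PySem.Set String →
    PySem.Dict String (Option String) → PySem.Dict String (Option String)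
  | 0, _, _, _, parent => parent
  | fuel + 1, queue, qi, visited, parent =>
    if h : qi < queue.length then
      let np := queue[qi]
      let parent := parent.insert np.1 np.2
      let st := (pvAdj relationship_graph np.1).foldl (bEnq np.1) (visited, queue)
      bStep relationship_graph fuel st.2 (qi + 1) st.1 parent
    else parent

-- B's `while node is not None:` reconstruction loop (fuel is a totality guard only; a missing key is
-- Python's KeyError, unreachable from the entry point since every recorded parent is itself recorded)
def bChain (parent : PySem.Dict String (Option String)) : Nat → String → List String
  | 0, _ => []
  | fuel + 1, node =>
    match parent.get? node with
    | some (some p) => node :: bChain parent fuel p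
    | _ => [node]

def connect_selected_tables_py_alt (selected_tables : List String) (relationship_graph : List (String × List String)) : List String :=
  (PySem.List.enumerate selected_tables).foldl
    (fun s p =>
      let targets := selected_tables.drop (p.1.toNat + 1)
      if targets.isEmpty then s
      else
        let parent := bStep relationship_graph (pvFuel relationship_graph)
          [(p.2, none)] 0 (PySem.Set.ofList [p.2]) PySem.Dict.empty
        targets.foldl
          (fun s end_table =>
            if (parent.get? end_table).isSome then
              PySem.Set.update s ((bChain parent (pvFuel relationship_graph) end_table).reverse)
            else s) s)
    (PySem.Set.ofList selected_tables)

-- ===== PRECONDITION & SPEC =====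
def Spec_connect_selected_tables_py (selected_tables : List String) (relationship_graph : List (String × List String)) (out : List String) : Prop := out = connect_selected_tables_py_alt selected_tables relationship_graph
instance (selected_tables : List String) (relationship_graph : List (String × List String)) (out : List String) : Decidable (Spec_connect_selected_tables_py selected_tables relationship_graph out) := by unfold Spec_connect_selected_tables_py; infer_instance

-- ===== CLAIM (what is proved, stated in full; the proofs are below) =====
def Claim_equal_connect_selected_tables_py : Prop := ∀ (selected_tables : List String) (relationship_graph : List (String × List String)), Dom_connect_selected_tables_py selected_tables relationship_graph → Spec_connect_selected_tables_py selected_tables relationship_graph (connect_selected_tables_py selected_tables relationship_graph)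

-- ===== LEMMAS AND PROOFS =====

-- the fresh (previously unvisited) neighbours, in scan order, as both enqueue folds see them
def pvFresh (v : PySem.Set String) : List String → List String
  | [] => []
  | nb :: ns => if PySem.Set.contains v nb then pvFresh v ns else nb :: pvFresh (PySem.Set.add v nb) ns

-- the visited set after either enqueue fold
def pvVis (v : PySem.Set String) : List String → PySem.Set String
  | [] => v
  | nb :: ns => if PySem.Set.contains v nb then pvVis v ns else pvVis (PySem.Set.add v nb) ns

theorem foldA (path : List String) (ns : List String) (v : PySem.Set String)
    (q : List (String × List String)) :
    ns.foldl (pvEnq path) (v, q)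
      = (pvVis v ns, q ++ (pvFresh v ns).map (fun nb => (nb, path ++ [nb]))) := by
  induction ns generalizing v q with
  | nil => simp [pvVis, pvFresh]
  | cons nb ns ih =>
    simp only [List.foldl_cons, pvEnq, pvVis, pvFresh]
    by_cases h : PySem.Set.contains v nb
    · simp only [h, if_true]; exact ih v q
    · simp only [h, Bool.false_eq_true, if_false]
      rw [ih]; simp

theorem foldB (node : String) (ns : List String) (v : PySem.Set String)
    (q : List (String × Option String)) :
    ns.foldl (bEnq node) (v, q)
      = (pvVis v ns, q ++ (pvFresh v ns).map (fun nb => (nb, some node))) := by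
  induction ns generalizing v q with
  | nil => simp [pvVis, pvFresh]
  | cons nb ns ih =>
    simp only [List.foldl_cons, bEnq, pvVis, pvFresh]
    by_cases h : PySem.Set.contains v nb
    · simp only [h, if_true]; exact ih v q
    · simp only [h, Bool.false_eq_true, if_false]
      rw [ih]; simp

theorem fresh_not_mem (v : PySem.Set String) (ns : List String) (x : String)
    (hx : x ∈ pvFresh v ns) : x ∉ v := by
  induction ns generalizing v with
  | nil => simp [pvFresh] at hx
  | cons nb ns ih =>
    simp only [pvFresh] at hx
    by_cases h : PySem.Set.contains v nb
    · simp only [h, if_true] at hx; exact ih v hx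
    · simp only [h, Bool.false_eq_true, if_false, List.mem_cons] at hx
      rcases hx with rfl | hx
      · simpa using h
      · intro hv
        exact ih _ hx (by simp [PySem.Set.mem_add, hv])

theorem fresh_nodup (v : PySem.Set String) (ns : List String) : (pvFresh v ns).Nodup := by
  induction ns generalizing v with
  | nil => simp [pvFresh]
  | cons nb ns ih =>
    simp only [pvFresh]
    by_cases h : PySem.Set.contains v nb
    · simp only [h, if_true]; exact ih v
    · simp only [h, Bool.false_eq_true, if_false, List.nodup_cons]
      refine ⟨fun hmem => ?_, ih _⟩
      exact fresh_not_mem _ _ _ hmem (by simp [PySem.Set.mem_add])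

theorem vis_mono (v : PySem.Set String) (ns : List String) (x : String) (hx : x ∈ v) :
    x ∈ pvVis v ns := by
  induction ns generalizing v with
  | nil => simpa [pvVis] using hx
  | cons nb ns ih =>
    simp only [pvVis]
    by_cases h : PySem.Set.contains v nb
    · simp only [h, if_true]; exact ih v hx
    · simp only [h, Bool.false_eq_true, if_false]
      exact ih _ (by simp [PySem.Set.mem_add, hx])

theorem fresh_sub_vis (v : PySem.Set String) (ns : List String) (x : String)
    (hx : x ∈ pvFresh v ns) : x ∈ pvVis v ns := by
  induction ns generalizing v with
  | nil => simp [pvFresh] at hx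
  | cons nb ns ih =>
    simp only [pvFresh, pvVis] at hx ⊢
    by_cases h : PySem.Set.contains v nb
    · simp only [h, if_true] at hx ⊢; exact ih v hx
    · simp only [h, Bool.false_eq_true, if_false, List.mem_cons] at hx ⊢
      rcases hx with rfl | hx
      · exact vis_mono _ _ _ (by simp [PySem.Set.mem_add])
      · exact ih _ hx

-- `p` is the root path of `n` in the parent-pointer tree (reconstruction chain, reversed)
inductive PvChain (parent : PySem.Dict String (Option String)) : String → List String → Prop
  | base (n : String) : parent.get? n = some none → PvChain parent n [n]
  | step (n m : String) (q : List String) :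
      parent.get? n = some (some m) → PvChain parent m q → PvChain parent n (q ++ [n])

theorem chain_stable (parent parent' : PySem.Dict String (Option String))
    (h : ∀ k val, parent.get? k = some val → parent'.get? k = some val)
    (n : String) (p : List String) (hc : PvChain parent n p) : PvChain parent' n p := by
  induction hc with
  | base n hn => exact PvChain.base n (h n none hn)
  | step n m q hn _ ih => exact PvChain.step n m q (h n (some m) hn) ih

theorem ext_insert_fresh (parent : PySem.Dict String (Option String)) (k : String)
    (w : Option String) (hk : parent.get? k = none) :
    ∀ k' val, parent.get? k' = some val → (parent.insert k w).get? k' = some val := by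
  intro k' val h'
  have hne : k' ≠ k := fun he => by rw [he, hk] at h'; cases h'
  rw [PySem.Dict.get?_insert_of_ne _ _ hne]
  exact h'

theorem chain_eval (parent : PySem.Dict String (Option String)) (n : String) (p : List String)
    (hc : PvChain parent n p) : ∀ f, p.length ≤ f → bChain parent f n = p.reverse := by
  induction hc with
  | base n hn =>
    intro f hf
    cases f with
    | zero => simp at hf
    | succ f => simp [bChain, hn]
  | step n m q hn hq ih =>
    intro f hf
    cases f with
    | zero => simp at hf
    | succ f =>
      have hlen : q.length ≤ f := by simp at hf; omega
      simp [bChain, hn, ih f hlen]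

-- one dequeue step preserves the BFS bookkeeping invariants
theorem stepInv (g : List (String × List String)) (queue : List (String × Option String))
    (qi : Nat) (hq : qi < queue.length) (v : PySem.Set String)
    (parent : PySem.Dict String (Option String))
    (hnone : ∀ x ∈ (queue.drop qi).map Prod.fst, parent.get? x = none)
    (hsub : ∀ x ∈ (queue.drop qi).map Prod.fst, x ∈ v)
    (hnd : ((queue.drop qi).map Prod.fst).Nodup)
    (hkeys : ∀ k val, parent.get? k = some val → k ∈ v) :
    (∀ x ∈ (((queue ++ (pvFresh v (pvAdj g queue[qi].1)).map (fun nb => (nb, some queue[qi].1))).drop (qi + 1)).map Prod.fst),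
        (parent.insert queue[qi].1 queue[qi].2).get? x = none)
    ∧ (∀ x ∈ (((queue ++ (pvFresh v (pvAdj g queue[qi].1)).map (fun nb => (nb, some queue[qi].1))).drop (qi + 1)).map Prod.fst),
        x ∈ pvVis v (pvAdj g queue[qi].1))
    ∧ (((queue ++ (pvFresh v (pvAdj g queue[qi].1)).map (fun nb => (nb, some queue[qi].1))).drop (qi + 1)).map Prod.fst).Nodup
    ∧ (∀ k val, (parent.insert queue[qi].1 queue[qi].2).get? k = some val → k ∈ pvVis v (pvAdj g queue[qi].1)) := by
  have hdrop : queue.drop qi = queue[qi] :: queue.drop (qi + 1) := List.drop_eq_getElem_cons hq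
  have hdq : ((queue ++ (pvFresh v (pvAdj g queue[qi].1)).map (fun nb => (nb, some queue[qi].1))).drop (qi + 1))
      = queue.drop (qi + 1) ++ (pvFresh v (pvAdj g queue[qi].1)).map (fun nb => (nb, some queue[qi].1)) :=
    List.drop_append_of_le_length (by omega)
  have hmapfst : ((pvFresh v (pvAdj g queue[qi].1)).map (fun nb => (nb, some queue[qi].1))).map Prod.fst
      = pvFresh v (pvAdj g queue[qi].1) := by simp [Function.comp_def]
  have hndrest : ((queue.drop (qi + 1)).map Prod.fst).Nodup := by
    rw [hdrop, List.map_cons, List.nodup_cons] at hnd; exact hnd.2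
  have hhdnotin : queue[qi].1 ∉ (queue.drop (qi + 1)).map Prod.fst := by
    rw [hdrop, List.map_cons, List.nodup_cons] at hnd; exact hnd.1
  have hhdv : queue[qi].1 ∈ v := by
    refine hsub _ ?_
    rw [hdrop, List.map_cons]; exact List.mem_cons_self ..
  have hmem : ∀ x ∈ (((queue ++ (pvFresh v (pvAdj g queue[qi].1)).map (fun nb => (nb, some queue[qi].1))).drop (qi + 1)).map Prod.fst),
      x ∈ (queue.drop (qi + 1)).map Prod.fst ∨ x ∈ pvFresh v (pvAdj g queue[qi].1) := by
    intro x hx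
    rw [hdq, List.map_append, hmapfst, List.mem_append] at hx
    exact hx
  refine ⟨?_, ?_, ?_, ?_⟩
  · intro x hx
    rcases hmem x hx with hx | hx
    · have hxne : x ≠ queue[qi].1 := fun he => hhdnotin (he ▸ hx)
      rw [PySem.Dict.get?_insert_of_ne _ _ hxne]
      refine hnone x ?_
      rw [hdrop, List.map_cons]; exact List.mem_cons_of_mem _ hx
    · have hxv : x ∉ v := fresh_not_mem _ _ _ hx
      have hxne : x ≠ queue[qi].1 := fun he => hxv (he ▸ hhdv)
      rw [PySem.Dict.get?_insert_of_ne _ _ hxne]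
      cases h : parent.get? x with
      | none => rfl
      | some val => exact absurd (hkeys _ _ h) hxv
  · intro x hx
    rcases hmem x hx with hx | hx
    · refine vis_mono _ _ _ (hsub x ?_)
      rw [hdrop, List.map_cons]; exact List.mem_cons_of_mem _ hx
    · exact fresh_sub_vis _ _ _ hx
  · rw [hdq, List.map_append, hmapfst]
    rw [List.nodup_append]
    refine ⟨hndrest, fresh_nodup _ _, ?_⟩
    intro x hx y hy hxy
    refine fresh_not_mem _ _ _ hy ?_
    refine hsub y ?_
    rw [hdrop, List.map_cons]
    exact List.mem_cons_of_mem _ (hxy ▸ hx)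
  · intro k val hk
    by_cases hke : k = queue[qi].1
    · exact vis_mono _ _ _ (hke ▸ hhdv)
    · rw [PySem.Dict.get?_insert_of_ne _ _ hke] at hk
      exact vis_mono _ _ _ (hkeys _ _ hk)

theorem bStep_extends (g : List (String × List String)) :
    ∀ (fuel : Nat) (queue : List (String × Option String)) (qi : Nat)
      (v : PySem.Set String) (parent : PySem.Dict String (Option String)),
    (∀ x ∈ (queue.drop qi).map Prod.fst, parent.get? x = none) →
    (∀ x ∈ (queue.drop qi).map Prod.fst, x ∈ v) →
    ((queue.drop qi).map Prod.fst).Nodup →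
    (∀ k val, parent.get? k = some val → k ∈ v) →
    ∀ k val, parent.get? k = some val →
      (bStep g fuel queue qi v parent).get? k = some val := by
  intro fuel
  induction fuel with
  | zero =>
    intro queue qi v parent _ _ _ _ k val hk
    simpa [bStep] using hk
  | succ fuel ih =>
    intro queue qi v parent hnone hsub hnd hkeys k val hk
    by_cases hq : qi < queue.length
    · obtain ⟨i1, i2, i3, i4⟩ := stepInv g queue qi hq v parent hnone hsub hnd hkeys
      have hke : k ≠ queue[qi].1 := by
        intro he
        have := hnone queue[qi].1 (by
          rw [List.drop_eq_getElem_cons hq, List.map_cons]; exact List.mem_cons_self ..)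
        rw [he, this] at hk; cases hk
      simp only [bStep, dif_pos hq]
      rw [foldB]
      exact ih _ _ _ _ i1 i2 i3 i4 k val
        (by rw [PySem.Dict.get?_insert_of_ne _ _ hke]; exact hk)
    · simpa [bStep, dif_neg hq] using hk

-- coupling relation between an entry of A's queue and the matching entry of B's queue
def CoupleRel (g : List (String × List String)) (parent : PySem.Dict String (Option String))
    (fuel : Nat) (a : String × List String) (b : String × Option String) : Prop :=
  a.1 = b.1 ∧ a.2.length + fuel ≤ pvFuel g + 1 ∧
  (b.2 = none → a.2 = [a.1]) ∧
  (∀ m, b.2 = some m → ∃ q, PvChain parent m q ∧ a.2 = q ++ [a.1])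

theorem coupleRel_mono (g : List (String × List String))
    (parent parent' : PySem.Dict String (Option String))
    (h : ∀ k val, parent.get? k = some val → parent'.get? k = some val)
    (fuel : Nat) (a : String × List String) (b : String × Option String)
    (hr : CoupleRel g parent (fuel + 1) a b) : CoupleRel g parent' fuel a b := by
  obtain ⟨h1, h2, h3, h4⟩ := hr
  refine ⟨h1, by omega, h3, fun m hm => ?_⟩
  obtain ⟨q, hq, he⟩ := h4 m hm
  exact ⟨q, chain_stable _ _ h _ _ hq, he⟩

theorem forall₂_map_map {α β γ : Type} (R : β → γ → Prop) (f : α → β) (h : α → γ)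
    (l : List α) (hR : ∀ x ∈ l, R (f x) (h x)) : List.Forall₂ R (l.map f) (l.map h) := by
  induction l with
  | nil => exact List.Forall₂.nil
  | cons x l ih =>
    exact List.Forall₂.cons (hR x (List.mem_cons_self ..))
      (ih (fun y hy => hR y (List.mem_cons_of_mem _ hy)))

theorem pvForall₂_append {α β : Type} (R : α → β → Prop) {l1 l2 : List α} {u1 u2 : List β}
    (h1 : List.Forall₂ R l1 u1) (h2 : List.Forall₂ R l2 u2) :
    List.Forall₂ R (l1 ++ l2) (u1 ++ u2) := by
  induction h1 with
  | nil => simpa using h2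
  | cons h _ ih => exact List.Forall₂.cons h ih

-- the simulation: A's per-pair BFS answer = lookup + reconstruction in B's parent-pointer tree
theorem couple (g : List (String × List String)) (e : String) :
    ∀ (fuel : Nat) (qA : List (String × List String)) (qB : List (String × Option String))
      (qi : Nat) (v : PySem.Set String) (parent : PySem.Dict String (Option String)),
    qi ≤ qB.length →
    List.Forall₂ (CoupleRel g parent fuel) qA (qB.drop qi) →
    (∀ x ∈ (qB.drop qi).map Prod.fst, parent.get? x = none) →
    (∀ x ∈ (qB.drop qi).map Prod.fst, x ∈ v) →
    ((qB.drop qi).map Prod.fst).Nodup →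
    (∀ k val, parent.get? k = some val → k ∈ v) →
    parent.get? e = none →
    aSearch g e fuel qA v =
      (if ((bStep g fuel qB qi v parent).get? e).isSome then
         some ((bChain (bStep g fuel qB qi v parent) (pvFuel g) e).reverse)
       else none) := by
  intro fuel
  induction fuel with
  | zero =>
    intro qA qB qi v parent _ _ _ _ _ _ hee
    simp [aSearch, bStep, hee]
  | succ fuel ih =>
    intro qA qB qi v parent hqi hrel hnone hsub hnd hkeys hee
    cases qA with
    | nil =>
      have hnil := List.forall₂_nil_left_iff.mp hrel
      have hge : ¬ qi < qB.length := by
        intro h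
        rw [List.drop_eq_getElem_cons h] at hnil
        cases hnil
      simp [aSearch, bStep, dif_neg hge, hee]
    | cons a restA =>
      obtain ⟨cur, path⟩ := a
      have hq : qi < qB.length := by
        by_contra h
        rw [List.drop_eq_nil_of_le (le_of_not_gt h)] at hrel
        cases hrel
      have hdrop : qB.drop qi = qB[qi] :: qB.drop (qi + 1) := List.drop_eq_getElem_cons hq
      rw [hdrop] at hrel
      rcases hrel with _ | ⟨hr, hrest⟩
      obtain ⟨hfst, hlen, hnoneCase, hsomeCase⟩ := hr
      simp only at hfst hlen hnoneCase hsomeCase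
      subst hfst
      have hhdnone : parent.get? qB[qi].1 = none := by
        refine hnone _ ?_
        rw [hdrop, List.map_cons]; exact List.mem_cons_self ..
      have hstable := ext_insert_fresh parent qB[qi].1 qB[qi].2 hhdnone
      have hchain : PvChain (parent.insert qB[qi].1 qB[qi].2) qB[qi].1 path := by
        cases hb : qB[qi].2 with
        | none =>
          have hp : path = [qB[qi].1] := hnoneCase hb
          rw [hp]
          exact PvChain.base _ (PySem.Dict.get?_insert_self _ _ _)
        | some m =>
          obtain ⟨q, hqc, hpq⟩ := hsomeCase m hb
          rw [hpq]
          refine PvChain.step _ m q (PySem.Dict.get?_insert_self _ _ _) ?_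
          refine chain_stable _ _ ?_ _ _ hqc
          rw [hb] at hstable
          exact hstable
      obtain ⟨i1, i2, i3, i4⟩ := stepInv g qB qi hq v parent hnone hsub hnd hkeys
      have hbs : bStep g (fuel + 1) qB qi v parent
          = bStep g fuel (qB ++ (pvFresh v (pvAdj g qB[qi].1)).map (fun nb => (nb, some qB[qi].1)))
              (qi + 1) (pvVis v (pvAdj g qB[qi].1)) (parent.insert qB[qi].1 qB[qi].2) := by
        simp only [bStep, dif_pos hq]
        rw [foldB]
      by_cases hce : qB[qi].1 = e
      · have hbeq : (qB[qi].1 == e) = true := by simpa using hce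
        have hPsome : (bStep g (fuel + 1) qB qi v parent).get? e = some qB[qi].2 := by
          rw [hbs]
          refine bStep_extends g fuel _ _ _ _ i1 i2 i3 i4 e _ ?_
          rw [hce] at hstable ⊢
          exact PySem.Dict.get?_insert_self _ _ _
        have hchainP : PvChain (bStep g (fuel + 1) qB qi v parent) e path := by
          rw [hbs]
          refine chain_stable _ _ (bStep_extends g fuel _ _ _ _ i1 i2 i3 i4) _ _ ?_
          rw [← hce]; exact hchain
        have hplen : path.length ≤ pvFuel g := by omega
        simp only [aSearch, hbeq, if_true, hPsome, Option.isSome_some, if_true,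
          chain_eval _ _ _ hchainP (pvFuel g) hplen, List.reverse_reverse]
      · have hbeq : (qB[qi].1 == e) = false := by simpa using hce
        simp only [aSearch, hbeq, Bool.false_eq_true, if_false]
        rw [foldA]
        dsimp only
        rw [hbs]
        refine ih (restA ++ (pvFresh v (pvAdj g qB[qi].1)).map (fun nb => (nb, path ++ [nb])))
          (qB ++ (pvFresh v (pvAdj g qB[qi].1)).map (fun nb => (nb, some qB[qi].1)))
          (qi + 1) (pvVis v (pvAdj g qB[qi].1)) (parent.insert qB[qi].1 qB[qi].2)
          (by simp; omega) ?_ i1 i2 i3 i4 ?_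
        · rw [List.drop_append_of_le_length (by omega)]
          refine pvForall₂_append _ ?_ ?_
          · exact hrest.imp (fun a b hr => coupleRel_mono g _ _ hstable fuel a b hr)
          · refine forall₂_map_map _ _ _ _ ?_
            intro nb _
            refine ⟨rfl, ?_, ?_, ?_⟩
            · simp only [List.length_append, List.length_cons, List.length_nil]
              omega
            · intro h
              simp at h
            · intro m hm
              simp only [Option.some.injEq] at hm
              subst hm
              exact ⟨path, hchain, rfl⟩
        · rw [PySem.Dict.get?_insert_of_ne _ _ (fun h => hce h.symm)]
          exact hee

-- ===== VERDICT (by name: the statement is the Claim_ definition above) =====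
theorem connect_selected_tables_py_spec : Claim_equal_connect_selected_tables_py := by
  intro sel g _
  show connect_selected_tables_py sel g = connect_selected_tables_py_alt sel g
  unfold connect_selected_tables_py connect_selected_tables_py_alt
  congr 1
  funext s p
  by_cases hemp : (sel.drop (p.1.toNat + 1)).isEmpty
  · simp [List.isEmpty_iff.mp hemp]
  · simp only [hemp, if_false, Bool.false_eq_true]
    congr 1
    funext s' e
    have h2 : List.Forall₂ (CoupleRel g PySem.Dict.empty (pvFuel g))
        [(p.2, [p.2])] (([(p.2, (none : Option String))]).drop 0) := by
      refine List.Forall₂.cons ?_ List.Forall₂.nil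
      exact ⟨rfl, by show 1 + pvFuel g ≤ pvFuel g + 1; omega, fun _ => rfl, fun m hm => by simp at hm⟩
    have hc := couple g e (pvFuel g) [(p.2, [p.2])] [(p.2, none)] 0
      (PySem.Set.ofList [p.2]) PySem.Dict.empty (by simp) h2
      (by intro x hx; exact PySem.Dict.get?_empty x)
      (by intro x hx; simp at hx; simp [PySem.Set.mem_ofList, hx])
      (by simp)
      (by intro k val hk; rw [PySem.Dict.get?_empty] at hk; cases hk)
      (PySem.Dict.get?_empty e)
    rw [hc]
    by_cases hs : ((bStep g (pvFuel g) [(p.2, none)] 0 (PySem.Set.ofList [p.2]) PySem.Dict.empty).get? e).isSome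
    · simp only [hs, if_true]
    · simp only [hs, Bool.false_eq_true, if_false]
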